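-- pv_equiv track=rewrite | github.com/insafhamdi/A2SV-Submissions | Smallest Even Multiple.py | smallestEvenMultiple
-- ===== SOURCE A (Python) =====
-- def smallestEvenMultiple(n):
--     """
--     :type n: int
--     :rtype: int
--     """
--     def gcd(a, b):
--         while b:
--             a, b = b, a % b
--         return a
--
--     def lcm(a, b):
--         return abs(a * b) // gcd(a, b)
--
--
--     return lcm(2, n)
-- ===== SOURCE B (Python) =====
-- def smallestEvenMultiple(n):
--     """
--     :type n: int
--     :rtype: int
--     """
--     return n if n % 2 == 0 else 2 * n
-- ===== Notes on version B (the rewrite author's own statement) =====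
-- stated objective: simpler
-- what changed: Replaced the Euclidean gcd/lcm helper loop with a single parity test: even inputs are returned unchanged, odd inputs are doubled.
import Mathlib
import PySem

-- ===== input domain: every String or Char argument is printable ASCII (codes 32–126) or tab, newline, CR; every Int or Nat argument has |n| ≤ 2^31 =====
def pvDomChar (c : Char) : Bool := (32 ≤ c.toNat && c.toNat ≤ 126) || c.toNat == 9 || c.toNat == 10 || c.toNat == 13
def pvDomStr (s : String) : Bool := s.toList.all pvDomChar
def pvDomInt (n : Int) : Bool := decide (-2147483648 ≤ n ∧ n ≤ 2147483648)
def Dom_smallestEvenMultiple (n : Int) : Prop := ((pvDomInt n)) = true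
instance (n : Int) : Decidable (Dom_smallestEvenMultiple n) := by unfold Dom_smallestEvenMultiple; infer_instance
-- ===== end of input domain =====

-- B replaces A's Euclidean gcd/lcm helpers with a single parity test (simpler, same values).

-- ===== PORT A =====
-- the inner 'while b: a, b = b, a % b' loop, as structural recursion on |b|
def pyGcdA (a b : Int) : Int :=
  if hb0 : b = 0 then a
  else pyGcdA b (PySem.Int.mod a b)
termination_by b.natAbs
decreasing_by
  rcases lt_trichotomy b 0 with hb | hb | hb
  · have := PySem.Int.mod_neg_bounds a hb; omega
  · exact absurd hb hb0
  · have h1 := PySem.Int.mod_nonneg a hb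
    have h2 := PySem.Int.mod_lt a hb
    omega

def pyLcmA (a b : Int) : Int := PySem.Int.floordiv |a * b| (pyGcdA a b)

def smallestEvenMultiple (n : Int) : Int := pyLcmA 2 n

-- ===== PORT B =====
def smallestEvenMultiple_alt (n : Int) : Int :=
  if PySem.Int.mod n 2 = 0 then n else 2 * n

-- ===== PRECONDITION & SPEC =====
def Spec_smallestEvenMultiple (n : Int) (out : Int) : Prop := out = smallestEvenMultiple_alt n
instance (n : Int) (out : Int) : Decidable (Spec_smallestEvenMultiple n out) := by unfold Spec_smallestEvenMultiple; infer_instance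

-- ===== CLAIM (what is proved, stated in full; the proofs are below) =====
def Claim_equal_smallestEvenMultiple : Prop := ∀ (n : Int), Dom_smallestEvenMultiple n → Spec_smallestEvenMultiple n (smallestEvenMultiple n)

-- ===== LEMMAS AND PROOFS =====

-- Python's floor-mod has the divisor's sign, so every nonzero remainder in the loop keeps
-- the sign of the original b; hence the loop returns sign(b) * gcd(|a|,|b|).
theorem pyGcdA_eq (b a : Int) (hb : b ≠ 0) :
    pyGcdA a b = (if 0 < b then 1 else -1) * Int.gcd a b := by
  induction hb' : b.natAbs using Nat.strong_induction_on generalizing a b with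
  | _ m ih =>
  subst hb'
  rw [pyGcdA, dif_neg hb]
  set r := PySem.Int.mod a b with hr
  by_cases hr0 : r = 0
  · -- b divides a; the loop returns b itself
    rw [hr0, pyGcdA, dif_pos rfl]
    have hdvd : b ∣ a := (PySem.Int.mod_eq_zero_iff_dvd a b).mp (hr.symm ▸ hr0)
    have hg : Int.gcd a b = b.natAbs := Int.gcd_eq_natAbs_right_iff_dvd.mpr hdvd
    rw [hg]
    rcases lt_trichotomy b 0 with h | h | h
    · simp only [not_lt.mpr (le_of_lt h), if_false]
      omega
    · exact absurd h hb
    · rw [if_pos h]; omega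
  · -- recurse; |r| < |b| and r has b's sign
    have hbound : r.natAbs < b.natAbs := by
      rw [hr]
      rcases lt_trichotomy b 0 with h | h | h
      · have := PySem.Int.mod_neg_bounds a h; omega
      · exact absurd h hb
      · have h1 := PySem.Int.mod_nonneg a h
        have h2 := PySem.Int.mod_lt a h
        omega
    rw [ih r.natAbs hbound r b hr0 rfl]
    have hq := PySem.Int.floordiv_mul_add_mod a b
    have hgcd : Int.gcd b r = Int.gcd a b := by
      have hrr : r = a + b * (-(PySem.Int.floordiv a b)) := by
        rw [hr]; linear_combination hq
      rw [hrr, Int.gcd_add_mul_left_right, Int.gcd_comm]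
    rw [hgcd]
    rcases lt_trichotomy b 0 with h | h | h
    · have hb2 := PySem.Int.mod_neg_bounds a h
      have hrneg : ¬ 0 < r := by rw [hr]; omega
      rw [if_neg (not_lt.mpr (le_of_lt h)), if_neg hrneg]
    · exact absurd h hb
    · have h1 := PySem.Int.mod_nonneg a h
      have hrpos : 0 < r := lt_of_le_of_ne (hr ▸ h1) (Ne.symm hr0)
      rw [if_pos h, if_pos hrpos]

theorem floordiv_of_exact (a b q : Int) (hb : b ≠ 0) (h : q * b = a) :
    PySem.Int.floordiv a b = q := by
  have h1 := PySem.Int.floordiv_mul_add_mod a b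
  have h2 : PySem.Int.mod a b = 0 := by
    rw [PySem.Int.mod_eq_zero_iff_dvd]; exact ⟨q, by linarith [h]⟩
  have h3 : PySem.Int.floordiv a b * b = q * b := by linear_combination h1 - h2 - h
  exact mul_right_cancel₀ hb h3

theorem gcd_two_even (n : Int) (h : (2:Int) ∣ n) : Int.gcd 2 n = 2 := by
  have h2 : 2 ∣ n.natAbs := by
    have := Int.natAbs_dvd_natAbs.mpr h
    simpa using this
  rw [Int.gcd]
  simpa using Nat.gcd_eq_left h2

theorem gcd_two_odd (n : Int) (h : ¬ (2:Int) ∣ n) : Int.gcd 2 n = 1 := by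
  have hd2 : Int.gcd 2 n ∣ 2 := by
    have := Int.gcd_dvd_left (a := (2:Int)) (b := n)
    exact_mod_cast this
  rcases (Nat.dvd_prime Nat.prime_two).mp hd2 with h1 | h1
  · exact h1
  · exfalso
    apply h
    have := Int.gcd_dvd_right (a := (2:Int)) (b := n)
    rw [h1] at this
    exact_mod_cast this

-- ===== VERDICT (by name: the statement is the Claim_ definition above) =====
theorem smallestEvenMultiple_spec : Claim_equal_smallestEvenMultiple := by
  intro n _
  unfold Spec_smallestEvenMultiple smallestEvenMultiple pyLcmA smallestEvenMultiple_alt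
  have hmod2 : PySem.Int.mod n 2 = n % 2 := PySem.Int.mod_eq_emod_of_pos (by norm_num)
  by_cases hn : n = 0
  · subst hn
    rw [pyGcdA, dif_pos rfl]
    rw [show |(2 : Int) * 0| = 0 by norm_num, floordiv_of_exact 0 2 0 (by norm_num) (by ring)]
    simp
  · rw [pyGcdA_eq n 2 hn]
    by_cases he : (2:Int) ∣ n
    · rw [gcd_two_even n he]
      have hB : (if PySem.Int.mod n 2 = 0 then n else 2 * n) = n := by
        rw [if_pos]; rw [hmod2]; omega
      rw [hB]
      rcases lt_trichotomy n 0 with h | h | h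
      · rw [if_neg (not_lt.mpr (le_of_lt h))]
        apply floordiv_of_exact _ _ _ (by norm_num)
        push_cast
        rcases abs_cases ((2:Int) * n) with ⟨h1, _⟩ | ⟨h1, _⟩ <;> omega
      · exact absurd h hn
      · rw [if_pos h]
        apply floordiv_of_exact _ _ _ (by norm_num)
        push_cast
        rcases abs_cases ((2:Int) * n) with ⟨h1, _⟩ | ⟨h1, _⟩ <;> omega
    · rw [gcd_two_odd n he]
      have hB : (if PySem.Int.mod n 2 = 0 then n else 2 * n) = 2 * n := by
        rw [if_neg]; rw [hmod2]; omega
      rw [hB]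
      rcases lt_trichotomy n 0 with h | h | h
      · rw [if_neg (not_lt.mpr (le_of_lt h))]
        apply floordiv_of_exact _ _ _ (by norm_num)
        push_cast
        rcases abs_cases ((2:Int) * n) with ⟨h1, _⟩ | ⟨h1, _⟩ <;> omega
      · exact absurd h hn
      · rw [if_pos h]
        apply floordiv_of_exact _ _ _ (by norm_num)
        push_cast
        rcases abs_cases ((2:Int) * n) with ⟨h1, _⟩ | ⟨h1, _⟩ <;> omega
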